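-- pv_equiv track=rewrite | github.com/dovydenkovas/Steganographer | V1.0/data/python/u2b.py | unicode2bit
-- ===== SOURCE A (Python) =====
-- def unicode2bit(unicode_list):
--     """ Convert string or byte string to list of bits by unicode table """
--     if type(unicode_list) == bytes:
--         unicode_list = unicode_list.decode()
--     bits_of_message = []
--     # for char_number in list of codes of symbols of string
--     for char_number in [ord(symbol) for symbol in unicode_list]:
--         # convert decimal number to binary number (list of bits)
--         bits_of_symbol = [int(bit) for bit in list(bin(char_number)[2:])]
--         # add fist zeros to 16 bit
--         while len(bits_of_symbol) < 16:
--             bits_of_symbol = [0] + bits_of_symbol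
--         bits_of_message += bits_of_symbol
--     return bits_of_message
-- ===== SOURCE B (Python) =====
-- def unicode2bit(unicode_list):
--     """ Convert string or byte string to list of bits by unicode table """
--     if type(unicode_list) == bytes:
--         unicode_list = unicode_list.decode()
--     bits_of_message = []
--     for symbol in unicode_list:
--         n = ord(symbol)
--         width = max(16, n.bit_length())
--         bits_of_message.extend((n >> i) & 1 for i in reversed(range(width)))
--     return bits_of_message
-- ===== Notes on version B (the rewrite author's own statement) =====
-- stated objective: idiomatic
-- what changed: Replaces the bin()-string parsing plus while-loop zero-prepending with direct bitwise extraction: each codepoint's bits are read MSB-first by shifting and masking over width = max(16, n.bit_length()).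
import Mathlib
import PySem

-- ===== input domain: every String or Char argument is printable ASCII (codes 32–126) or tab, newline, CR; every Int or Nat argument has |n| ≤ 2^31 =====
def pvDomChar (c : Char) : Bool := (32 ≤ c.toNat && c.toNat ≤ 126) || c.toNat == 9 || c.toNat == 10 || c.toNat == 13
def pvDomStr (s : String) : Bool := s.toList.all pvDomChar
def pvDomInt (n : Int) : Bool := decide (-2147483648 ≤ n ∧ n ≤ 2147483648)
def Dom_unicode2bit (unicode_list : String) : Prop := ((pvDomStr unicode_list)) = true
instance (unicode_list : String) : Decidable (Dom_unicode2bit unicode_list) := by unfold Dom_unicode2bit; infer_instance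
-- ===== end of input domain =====

-- B replaces A's bin()-string + while-loop zero-padding with direct shift/mask
-- bit extraction over width = max(16, bit_length); idiomatic, same cost.
-- (The Python `bytes` branch is vacuous under the String type convention.)

-- ===== PORT A =====
-- bin(n)[2:] for n > 0: binary digits, most significant first
-- fuel recursion so the kernel can evaluate it; fuel = n always suffices (n/2 < n)
def pvBinNatAux : Nat → Nat → List Int
  | 0, _ => []
  | fuel + 1, n => if n = 0 then [] else pvBinNatAux fuel (n / 2) ++ [((n % 2 : Nat) : Int)]

def pvBinNat (n : Nat) : List Int := pvBinNatAux n n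

-- [int(bit) for bit in list(bin(char_number)[2:])]  (bin(0) = '0b0')
def pvBinDigits (n : Nat) : List Int := if n = 0 then [0] else pvBinNat n

-- while len(bits_of_symbol) < 16: bits_of_symbol = [0] + bits_of_symbol
-- structural fuel recursion (16 steps always suffice: each step grows the list)
def pvPad16Aux : Nat → List Int → List Int
  | 0, bits => bits
  | fuel + 1, bits => if bits.length < 16 then pvPad16Aux fuel (0 :: bits) else bits

def pvPad16 (bits : List Int) : List Int := pvPad16Aux 16 bits

def unicode2bit (unicode_list : String) : List Int :=
  (unicode_list.toList.map (fun symbol => symbol.toNat)).foldl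
    (fun bits_of_message char_number =>
      bits_of_message ++ pvPad16 (pvBinDigits char_number)) []

-- ===== PORT B =====
-- n.bit_length()
-- fuel recursion for kernel evaluation; fuel = n suffices
def pvBitLengthAux : Nat → Nat → Nat
  | 0, _ => 0
  | fuel + 1, n => if n = 0 then 0 else pvBitLengthAux fuel (n / 2) + 1

def pvBitLength (n : Nat) : Nat := pvBitLengthAux n n

def unicode2bit_alt (unicode_list : String) : List Int :=
  unicode_list.toList.foldl
    (fun bits_of_message symbol =>
      let n := symbol.toNat
      let width := max 16 (pvBitLength n)
      bits_of_message ++ (List.range width).reverse.map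
        (fun i => (((n >>> i) &&& 1 : Nat) : Int))) []

-- ===== PRECONDITION & SPEC =====
def Spec_unicode2bit (unicode_list : String) (out : List Int) : Prop := out = unicode2bit_alt unicode_list
instance (unicode_list : String) (out : List Int) : Decidable (Spec_unicode2bit unicode_list out) := by unfold Spec_unicode2bit; infer_instance

-- ===== CLAIM (what is proved, stated in full; the proofs are below) =====
def Claim_equal_unicode2bit : Prop := ∀ (unicode_list : String), Dom_unicode2bit unicode_list → Spec_unicode2bit unicode_list (unicode2bit unicode_list)

-- ===== LEMMAS AND PROOFS =====

-- the per-character blocks of the two ports agree on every ASCII codepoint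
theorem pv_char_block_eq : ∀ n : Nat, n < 128 →
    pvPad16 (pvBinDigits n) =
      (List.range (max 16 (pvBitLength n))).reverse.map
        (fun i => (((n >>> i) &&& 1 : Nat) : Int)) := by
  decide

theorem pv_foldl_eq (l : List Char) (h : l.all pvDomChar = true) (acc : List Int) :
    (l.map (fun symbol => symbol.toNat)).foldl
        (fun bits_of_message char_number =>
          bits_of_message ++ pvPad16 (pvBinDigits char_number)) acc =
      l.foldl
        (fun bits_of_message symbol =>
          let n := symbol.toNat
          let width := max 16 (pvBitLength n)
          bits_of_message ++ (List.range width).reverse.map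
            (fun i => (((n >>> i) &&& 1 : Nat) : Int))) acc := by
  induction l generalizing acc with
  | nil => rfl
  | cons c t ih =>
    simp only [List.all_cons, Bool.and_eq_true] at h
    have hc : c.toNat < 128 := by
      unfold pvDomChar at h
      rcases h with ⟨h1, _⟩
      simp only [Bool.or_eq_true, Bool.and_eq_true, decide_eq_true_eq, beq_iff_eq] at h1
      omega
    simp only [List.map_cons, List.foldl_cons]
    rw [pv_char_block_eq c.toNat hc]
    exact ih h.2 _

-- ===== VERDICT (by name: the statement is the Claim_ definition above) =====
theorem unicode2bit_spec : Claim_equal_unicode2bit := by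
  intro s hdom
  unfold Spec_unicode2bit unicode2bit unicode2bit_alt
  exact pv_foldl_eq s.toList hdom []
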